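-- pv_equiv track=rewrite | github.com/LeeHa-Yeon/AlgorithmStudy | JejuAlgorithm/ex66.py | solution
-- ===== SOURCE A (Python) =====
-- def solution(allString,rule) :
--
--     answer = []
--     for subString in allString :
--         subList = []
--         for word in subString :
--             if word in rule :
--                 subList.append(word)
--         answer.append(isMatch(subList))
--     return answer
--
-- def isMatch(l) :
--     sortList = list(sorted(l))
--     if sortList == l :
--         return "가능"
--     else :
--         return "불가능"
-- ===== SOURCE B (Python) =====
-- def solution(allString, rule):
--     answer = []
--     for subString in allString:
--         ok = True
--         prev = None
--         for word in subString:
--             if word in rule: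
--                 if prev is not None and prev > word:
--                     ok = False
--                 prev = word
--         answer.append("가능" if ok else "불가능")
--     return answer
-- ===== Notes on version B (the rewrite author's own statement) =====
-- stated objective: alternative
-- what changed: Replaces A's per-substring filter-then-sort-then-compare with a single fused pass that keeps only the previous kept character and checks adjacent order, with no intermediate list and no sort.
import Mathlib
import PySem

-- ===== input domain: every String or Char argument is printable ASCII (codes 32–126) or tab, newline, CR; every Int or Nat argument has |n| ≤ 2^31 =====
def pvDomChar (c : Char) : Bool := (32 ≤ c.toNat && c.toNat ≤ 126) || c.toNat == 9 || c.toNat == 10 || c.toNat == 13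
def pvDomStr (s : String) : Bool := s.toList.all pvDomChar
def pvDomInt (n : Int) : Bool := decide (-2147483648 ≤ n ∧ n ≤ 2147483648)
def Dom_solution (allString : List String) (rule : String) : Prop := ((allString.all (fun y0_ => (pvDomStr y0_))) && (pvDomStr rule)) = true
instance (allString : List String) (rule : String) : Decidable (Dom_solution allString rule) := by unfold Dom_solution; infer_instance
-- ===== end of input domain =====

-- B fuses A's filter/sort/compare per substring into one pass keeping only the previous kept
-- character (objective: alternative — no intermediate list, no sort). Equivalence of return values.

-- ===== PORT A =====
-- 'word in rule' for a single character is exactly character membership in rule's characters.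
def isMatch (l : List Char) : String :=
  let sortList := PySem.List.sorted l (fun x => x) false
  if sortList = l then "가능" else "불가능"

def solution (allString : List String) (rule : String) : List String :=
  allString.foldl (fun answer subString =>
    let subList := subString.toList.foldl (fun subList word =>
      if rule.toList.contains word then subList ++ [word] else subList) []
    answer ++ [isMatch subList]) []

-- ===== PORT B =====
def solution_alt (allString : List String) (rule : String) : List String :=
  allString.foldl (fun answer subString =>
    let st := subString.toList.foldl (fun (st : Bool × Option Char) word =>
      if rule.toList.contains word then
        ((if (match st.2 with | some prev => decide (word < prev) | none => false) then false else st.1),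
         some word)
      else st) (true, none)
    answer ++ [if st.1 then "가능" else "불가능"]) []

-- ===== PRECONDITION & SPEC =====
def Spec_solution (allString : List String) (rule : String) (out : List String) : Prop := out = solution_alt allString rule
instance (allString : List String) (rule : String) (out : List String) : Decidable (Spec_solution allString rule out) := by unfold Spec_solution; infer_instance

-- ===== CLAIM (what is proved, stated in full; the proofs are below) =====
def Claim_equal_solution : Prop := ∀ (allString : List String) (rule : String), Dom_solution allString rule → Spec_solution allString rule (solution allString rule)

-- ===== LEMMAS AND PROOFS =====

-- B's scan step, restricted to the kept (filtered) characters.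
def stepB (st : Bool × Option Char) (word : Char) : Bool × Option Char :=
  ((if (match st.2 with | some prev => decide (word < prev) | none => false) then false else st.1),
   some word)

lemma stepB_fold_some (l : List Char) (ok : Bool) (p : Char) :
    (l.foldl stepB (ok, some p)).1 = true ↔ (ok = true ∧ List.IsChain (· ≤ ·) (p :: l)) := by
  induction l generalizing ok p with
  | nil => simp
  | cons c t ih =>
      simp only [List.foldl_cons, stepB, ih, List.isChain_cons_cons]
      by_cases h : c < p
      · simp [h, not_le.mpr h]
      · simp [h, not_lt.mp h]

lemma stepB_fold_none (l : List Char) :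
    (l.foldl stepB (true, none)).1 = true ↔ List.IsChain (· ≤ ·) l := by
  cases l with
  | nil => simp
  | cons c t =>
      simp only [List.foldl_cons, stepB]
      simpa using stepB_fold_some t true c

lemma sorted_eq_iff_chain (l : List Char) :
    PySem.List.sorted l (fun x => x) false = l ↔ List.IsChain (· ≤ ·) l := by
  constructor
  · intro h
    rw [List.isChain_iff_pairwise]
    have := PySem.List.sorted_pairwise l (fun x => x)
    rwa [h] at this
  · intro h
    exact PySem.List.sorted_eq_self_of_pairwise l (fun x => x)
      (by simpa using List.isChain_iff_pairwise.mp h)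

lemma per_string (subString rule : String) :
    isMatch (subString.toList.foldl (fun subList word =>
      if rule.toList.contains word then subList ++ [word] else subList) []) =
    (if (subString.toList.foldl (fun (st : Bool × Option Char) word =>
      if rule.toList.contains word then stepB st word else st) (true, none)).1
     then "가능" else "불가능") := by
  rw [PySem.List.foldl_append_if_eq_filter, ← List.foldl_filter]
  simp only [List.nil_append]
  set f := subString.toList.filter (fun word => rule.toList.contains word)
  rw [isMatch]
  by_cases h : List.IsChain (· ≤ ·) f
  · rw [if_pos ((sorted_eq_iff_chain f).mpr h), if_pos ((stepB_fold_none f).mpr h)]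
  · rw [if_neg (fun hs => h ((sorted_eq_iff_chain f).mp hs)),
        if_neg (fun hb => h ((stepB_fold_none f).mp hb))]

lemma solution_eq (allString : List String) (rule : String) :
    solution allString rule = solution_alt allString rule := by
  unfold solution solution_alt
  induction allString using List.reverseRecOn with
  | nil => rfl
  | append_singleton init s ih =>
      rw [List.foldl_append, List.foldl_append, ih]
      simp only [List.foldl_cons, List.foldl_nil]
      congr 1
      simpa [stepB] using per_string s rule

-- ===== VERDICT (by name: the statement is the Claim_ definition above) =====
theorem solution_spec : Claim_equal_solution := by
  intro allString rule _
  exact solution_eq allString rule
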